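-- pv_equiv track=rewrite | github.com/queelius/computational-explorations | src/ramsey_complexity.py | find_coprime_cliques
-- ===== SOURCE A (Python) =====
-- import math
-- from itertools import combinations, permutations
-- from typing import (
--     Any,
--     Dict,
--     List,
--     Optional,
--     Sequence,
--     Set,
--     Tuple,
-- )
--
-- def find_coprime_cliques(n: int, k: int) -> List[Tuple[int, ...]]:
--     """Enumerate all k-cliques in the coprime graph on [n]."""
--     if k < 1:
--         return []
--     if k == 1:
--         return [(v,) for v in range(1, n + 1)]
--     cliques = []
--     for c in combinations(range(1, n + 1), k):
--         if all(math.gcd(c[i], c[j]) == 1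
--                for i in range(k) for j in range(i + 1, k)):
--             cliques.append(c)
--     return cliques
-- ===== SOURCE B (Python) =====
-- import math
-- from typing import List, Tuple
--
--
-- def find_coprime_cliques(n: int, k: int) -> List[Tuple[int, ...]]:
--     """Enumerate all k-cliques in the coprime graph on [n] by backtracking:
--     a partial clique is only ever extended by vertices coprime to it."""
--     if k < 1:
--         return []
--
--     def extend(r, cands):
--         # all r-cliques (as tuples) drawn from cands, in lexicographic order;
--         # cands is already pairwise-compatible with the partial clique built so far
--         if r == 0:
--             return [()]
--         if len(cands) < r:
--             return []
--         v, rest = cands[0], cands[1:]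
--         with_v = [(v,) + t
--                   for t in extend(r - 1, [w for w in rest if math.gcd(v, w) == 1])]
--         return with_v + extend(r, rest)
--
--     return extend(k, list(range(1, n + 1)))
-- ===== Notes on version B (the rewrite author's own statement) =====
-- stated objective: alternative
-- what changed: Replaced the generate-and-test over all C(n,k) combinations with a pairwise gcd check per candidate by a backtracking search that only extends partial cliques with vertices coprime to them, pruning subtrees (including when fewer candidates remain than slots).
import Mathlib
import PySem

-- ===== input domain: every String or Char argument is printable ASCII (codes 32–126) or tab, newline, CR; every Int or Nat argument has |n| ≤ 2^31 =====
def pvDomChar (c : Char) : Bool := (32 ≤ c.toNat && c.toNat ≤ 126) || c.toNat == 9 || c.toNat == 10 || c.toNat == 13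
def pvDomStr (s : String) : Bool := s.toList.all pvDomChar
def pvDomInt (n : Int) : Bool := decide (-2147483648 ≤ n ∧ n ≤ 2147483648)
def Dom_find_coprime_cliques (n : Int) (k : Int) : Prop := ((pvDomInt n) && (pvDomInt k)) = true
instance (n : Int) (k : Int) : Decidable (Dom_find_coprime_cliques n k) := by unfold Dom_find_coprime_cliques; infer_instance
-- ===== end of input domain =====

-- B replaces A's generate-and-test over all combinations (pairwise gcd check on each)
-- by a backtracking search that extends partial cliques only with coprime vertices.


-- ===== PORT A =====
-- itertools.combinations(l, k) in Python's (lexicographic) emission order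
def pyCombinations : Nat → List Int → List (List Int)
  | 0, _ => [[]]
  | _ + 1, [] => []
  | k + 1, x :: xs => (pyCombinations k xs).map (x :: ·) ++ pyCombinations (k + 1) xs

-- all(math.gcd(c[i], c[j]) == 1 for i in range(k) for j in range(i+1, k)); indices always in range
def pairOK (c : List Int) (k : Int) : Bool :=
  (PySem.List.pyRange 0 k 1).all (fun i =>
    (PySem.List.pyRange (i + 1) k 1).all (fun j =>
      Int.gcd (PySem.List.pyGetD c i 0) (PySem.List.pyGetD c j 0) == 1))

def find_coprime_cliques (n : Int) (k : Int) : List (List Int) :=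
  if k < 1 then []
  else if k = 1 then (PySem.List.pyRange 1 (n + 1) 1).map (fun v => [v])
  else
    (pyCombinations k.toNat (PySem.List.pyRange 1 (n + 1) 1)).foldl
      (fun cliques c => if pairOK c k then cliques ++ [c] else cliques) []

-- ===== PORT B =====
-- extend(r, cands) from Source B: all r-cliques from cands, head taken then candidates filtered to coprimes
def extendB (r : Int) (cands : List Int) : List (List Int) :=
  if r = 0 then [[]]
  else if (cands.length : Int) < r then []
  else
    match cands with
    | [] => []  -- unreachable: here 1 ≤ r ≤ cands.length
    | v :: rest =>
      ((extendB (r - 1) (rest.filter (fun w => Int.gcd v w == 1))).map (v :: ·)) ++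
        extendB r rest
termination_by cands.length
decreasing_by
  · simpa using Nat.lt_succ_of_le (List.length_filter_le _ rest)
  · simp

def find_coprime_cliques_alt (n : Int) (k : Int) : List (List Int) :=
  if k < 1 then [] else extendB k (PySem.List.pyRange 1 (n + 1) 1)

-- ===== PRECONDITION & SPEC =====
def Spec_find_coprime_cliques (n : Int) (k : Int) (out : List (List Int)) : Prop := out = find_coprime_cliques_alt n k
instance (n : Int) (k : Int) (out : List (List Int)) : Decidable (Spec_find_coprime_cliques n k out) := by unfold Spec_find_coprime_cliques; infer_instance

-- ===== CLAIM (what is proved, stated in full; the proofs are below) =====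
def Claim_equal_find_coprime_cliques : Prop := ∀ (n : Int) (k : Int), Dom_find_coprime_cliques n k → Spec_find_coprime_cliques n k (find_coprime_cliques n k)

-- ===== LEMMAS AND PROOFS =====

-- head-wise pairwise-coprimality, proof-side bridge between pairOK and extendB
def PW : List Int → Bool
  | [] => true
  | x :: c => c.all (fun w => Int.gcd x w == 1) && PW c

theorem PW_iff_pairwise (c : List Int) :
    PW c = true ↔ c.Pairwise (fun a b => Int.gcd a b = 1) := by
  induction c with
  | nil => simp [PW]
  | cons x c ih => simp [PW, ih, List.pairwise_cons, List.all_eq_true, and_comm]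

theorem length_mem_pyCombinations {k : Nat} {xs c : List Int}
    (h : c ∈ pyCombinations k xs) : c.length = k := by
  induction xs generalizing k c with
  | nil =>
    cases k with
    | zero => simp [pyCombinations] at h; simp [h]
    | succ k => simp [pyCombinations] at h
  | cons x xs ih =>
    cases k with
    | zero => simp [pyCombinations] at h; simp [h]
    | succ k =>
      simp only [pyCombinations, List.mem_append, List.mem_map] at h
      rcases h with ⟨c', hc', rfl⟩ | h
      · simp [ih hc']
      · exact ih h

theorem pyCombinations_filter (q : Int → Bool) (xs : List Int) (k : Nat) :
    pyCombinations k (xs.filter q) = (pyCombinations k xs).filter (·.all q) := by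
  induction xs generalizing k with
  | nil =>
    cases k with
    | zero => simp [pyCombinations]
    | succ k => simp [pyCombinations]
  | cons x xs ih =>
    cases k with
    | zero => simp [pyCombinations]
    | succ k =>
      rw [List.filter_cons]
      by_cases hx : q x = true
      · rw [if_pos hx]
        simp only [pyCombinations, ih, List.filter_append, List.filter_map,
          Function.comp_def]
        congr 2
        apply List.filter_congr
        intro c _
        simp [hx]
      · rw [if_neg hx]
        simp only [pyCombinations, ih, List.filter_append, List.filter_map,
          Function.comp_def]
        have hnil : ((pyCombinations k xs).filter fun c => (x :: c).all q) = [] :=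
          List.filter_eq_nil_iff.mpr (fun c _ => by simp [hx])
        rw [hnil]
        simp

theorem pyCombinations_eq_nil {k : Nat} {xs : List Int} (h : xs.length < k) :
    pyCombinations k xs = [] := by
  induction xs generalizing k with
  | nil => cases k with
    | zero => omega
    | succ k => rfl
  | cons x xs ih => cases k with
    | zero => omega
    | succ k =>
      have h1 : xs.length < k := by simp at h; omega
      simp [pyCombinations, ih h1, ih (Nat.lt_succ_of_lt h1)]

-- main correspondence: filtered combinations = backtracking
theorem extendB_eq (k : Nat) (xs : List Int) :
    (pyCombinations k xs).filter PW = extendB (k : Int) xs := by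
  induction hn : xs.length using Nat.strong_induction_on generalizing xs k with
  | _ n ih =>
    subst hn
    cases k with
    | zero => rw [extendB.eq_def]; simp [pyCombinations, PW]
    | succ k =>
      have hk : ((k : Int) + 1) ≠ 0 := by omega
      by_cases hlen : (xs.length : Int) < (k : Int) + 1
      · rw [extendB.eq_def]
        simp only [Nat.cast_succ, hk, if_false, hlen, if_true]
        rw [pyCombinations_eq_nil (by omega)]
        rfl
      · cases xs with
        | nil => simp at hlen
        | cons x xs =>
        rw [extendB]
        simp only [Nat.cast_succ, hk, if_false, hlen, add_sub_cancel_right]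
        simp only [pyCombinations, List.filter_append, List.filter_map,
          Function.comp_def]
        congr 1
        · -- head branch
          congr 1
          have h1 : ((pyCombinations k xs).filter fun c => PW (x :: c)) =
              ((pyCombinations k xs).filter (·.all fun w => Int.gcd x w == 1)).filter PW := by
            rw [List.filter_filter]
            apply List.filter_congr
            intro c _
            simp [PW, Bool.and_comm]
          rw [h1, ← pyCombinations_filter,
            ih _ (by simpa using Nat.lt_succ_of_le (List.length_filter_le _ xs)) _ _ rfl]
        · exact ih _ (by simp) _ _ rfl

theorem extendB_zero (l : List Int) : extendB 0 l = [[]] := by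
  rw [extendB.eq_def]; simp

theorem extendB_one (xs : List Int) :
    extendB 1 xs = xs.map (fun v => [v]) := by
  induction xs with
  | nil => rw [extendB.eq_def]; simp
  | cons x xs ih =>
    rw [extendB]
    simp [extendB_zero, ih]

theorem foldl_append_filter (p : List Int → Bool) (l : List (List Int)) (acc : List (List Int)) :
    l.foldl (fun cliques c => if p c then cliques ++ [c] else cliques) acc
      = acc ++ l.filter p := by
  induction l generalizing acc with
  | nil => simp
  | cons c l ih =>
    by_cases hc : p c = true <;> simp [hc, ih]

theorem pairOK_eq_PW {c : List Int} {k : Nat} (hc : c.length = k) :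
    pairOK c (k : Int) = PW c := by
  rw [Bool.eq_iff_iff, PW_iff_pairwise, List.pairwise_iff_getElem]
  simp only [pairOK, List.all_eq_true, PySem.List.mem_pyRange_one, beq_iff_eq]
  constructor
  · intro h i j hi hj hij
    have h1 := h (i : Int) ⟨by omega, by omega⟩ (j : Int) ⟨by omega, by omega⟩
    rw [PySem.List.pyGetD_eq_getElem c 0 (by omega) (by omega),
      PySem.List.pyGetD_eq_getElem c 0 (by omega) (by omega)] at h1
    simpa using h1
  · intro h i ⟨hi0, hik⟩ j ⟨hj0, hjk⟩
    have hi' : i.toNat < c.length := by omega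
    have hj' : j.toNat < c.length := by omega
    have h1 := h i.toNat j.toNat hi' hj' (by omega)
    rwa [PySem.List.pyGetD_eq_getElem c 0 hi0 (by omega),
      PySem.List.pyGetD_eq_getElem c 0 (by omega) (by omega)]

-- ===== VERDICT (by name: the statement is the Claim_ definition above) =====
theorem find_coprime_cliques_spec : Claim_equal_find_coprime_cliques := by
  intro n k _
  show find_coprime_cliques n k = find_coprime_cliques_alt n k
  unfold find_coprime_cliques find_coprime_cliques_alt
  by_cases h1 : k < 1
  · simp [h1]
  · by_cases h2 : k = 1
    · simp [h2, extendB_one]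
    · simp only [h1, h2, if_false]
      rw [foldl_append_filter, List.nil_append]
      have hfc : ∀ c ∈ pyCombinations k.toNat (PySem.List.pyRange 1 (n + 1) 1),
          pairOK c k = PW c := by
        intro c hc
        have hl := length_mem_pyCombinations hc
        have : ((k.toNat : Nat) : Int) = k := by omega
        rw [← this]
        exact pairOK_eq_PW hl
      rw [List.filter_congr hfc, extendB_eq]
      congr 1
      omega
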